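-- pv_equiv track=rewrite | github.com/idilsuerdenlig/hierarchical_thesis | src/temporary_vis_ghaamzade.py | pick_eps
-- ===== SOURCE A (Python) =====
-- def pick_eps(dataset, start, end):
--
--     dataset_ep = list()
--     dataset_ep_list = list()
--     for dataset_step in dataset:
--         if not dataset_step[-1]:
--             dataset_ep.append(dataset_step)
--         else:
--             dataset_ep.append(dataset_step)
--             dataset_ep_list.append(dataset_ep)
--             dataset_ep = list()
--     return dataset_ep_list[start:end]
-- ===== SOURCE B (Python) =====
-- def pick_eps(dataset, start, end):
--     steps = list(dataset)
--     bounds = [i for i, s in enumerate(steps) if s[-1]]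
--     episodes = []
--     prev = -1
--     for b in bounds:
--         episodes.append(steps[prev + 1:b + 1])
--         prev = b
--     return episodes[start:end]
-- ===== Notes on version B (the rewrite author's own statement) =====
-- stated objective: alternative
-- what changed: Instead of carrying a growing current-episode accumulator through the loop, B first collects the terminal-step indices in one pass and then reconstructs each episode as a slice between consecutive boundaries.
import Mathlib
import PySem

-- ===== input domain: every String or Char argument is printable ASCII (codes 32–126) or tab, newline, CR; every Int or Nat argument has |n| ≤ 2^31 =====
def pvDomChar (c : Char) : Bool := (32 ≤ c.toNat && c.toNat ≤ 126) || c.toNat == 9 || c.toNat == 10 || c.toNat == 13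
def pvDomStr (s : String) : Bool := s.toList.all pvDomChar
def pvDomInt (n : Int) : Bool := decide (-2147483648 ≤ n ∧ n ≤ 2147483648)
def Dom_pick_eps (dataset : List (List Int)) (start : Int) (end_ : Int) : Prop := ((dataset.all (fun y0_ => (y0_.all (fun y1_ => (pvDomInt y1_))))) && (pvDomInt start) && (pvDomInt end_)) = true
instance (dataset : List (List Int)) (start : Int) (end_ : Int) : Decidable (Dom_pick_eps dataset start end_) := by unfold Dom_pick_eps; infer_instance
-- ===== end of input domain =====

-- B differs from A by collecting terminal indices first and slicing episodes between
-- consecutive boundaries (objective: alternative decomposition, same cost).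

-- step[-1] of a dataset step; Python raises IndexError on an empty step, which Pre_ excludes,
-- so the default 0 is never observed on admitted inputs.
def pvLastVal (s : List Int) : Int := (PySem.List.pyGet? s (-1)).getD 0

-- ===== PORT A =====
def pick_eps (dataset : List (List Int)) (start : Int) (end_ : Int) : List (List (List Int)) :=
  let st := dataset.foldl
    (fun (st : List (List Int) × List (List (List Int))) (dataset_step : List Int) =>
      if pvLastVal dataset_step = 0 then
        (st.1 ++ [dataset_step], st.2)
      else
        ([], st.2 ++ [st.1 ++ [dataset_step]]))
    ([], [])
  PySem.List.slice st.2 (some start) (some end_)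

-- ===== PORT B =====
-- [i for i, s in enumerate(steps) if s[-1]]
def pvBoundsFrom (i : Int) : List (List Int) → List Int
  | [] => []
  | s :: rest => if pvLastVal s ≠ 0 then i :: pvBoundsFrom (i + 1) rest else pvBoundsFrom (i + 1) rest

-- the loop over bounds: episodes.append(steps[prev+1 : b+1]); prev = b
def pvEpisFold (steps : List (List Int)) : List Int → Int → List (List (List Int))
  | [], _ => []
  | b :: bs, prev => PySem.List.slice steps (some (prev + 1)) (some (b + 1)) :: pvEpisFold steps bs b

def pick_eps_alt (dataset : List (List Int)) (start : Int) (end_ : Int) : List (List (List Int)) :=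
  let steps := dataset
  let bounds := pvBoundsFrom 0 steps
  let episodes := pvEpisFold steps bounds (-1)
  PySem.List.slice episodes (some start) (some end_)

-- ===== PRECONDITION & SPEC =====
-- Pre_ excludes datasets containing an empty step: there dataset_step[-1] raises IndexError in both A and B.
def Pre_pick_eps (dataset : List (List Int)) (start : Int) (end_ : Int) : Prop :=
  ∀ s ∈ dataset, s ≠ []
instance (dataset : List (List Int)) (start : Int) (end_ : Int) : Decidable (Pre_pick_eps dataset start end_) := by unfold Pre_pick_eps; infer_instance

def pvWitness_pick_eps : List (List Int) × Int × Int := ([[0, 0], [1, 1], [2, 0]], 0, 2)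

def Spec_pick_eps (dataset : List (List Int)) (start : Int) (end_ : Int) (out : List (List (List Int))) : Prop := out = pick_eps_alt dataset start end_
instance (dataset : List (List Int)) (start : Int) (end_ : Int) (out : List (List (List Int))) : Decidable (Spec_pick_eps dataset start end_ out) := by unfold Spec_pick_eps; infer_instance

-- ===== CLAIM (what is proved, stated in full; the proofs are below) =====
def Claim_equal_pick_eps : Prop := ∀ (dataset : List (List Int)) (start : Int) (end_ : Int), Dom_pick_eps dataset start end_ → Pre_pick_eps dataset start end_ → Spec_pick_eps dataset start end_ (pick_eps dataset start end_)

-- ===== LEMMAS AND PROOFS =====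

-- common specification: split the step list into episodes ending at terminal steps,
-- carrying the current (pending) episode cur
def pvSplit (cur : List (List Int)) : List (List Int) → List (List (List Int))
  | [] => []
  | s :: rest => if pvLastVal s ≠ 0 then (cur ++ [s]) :: pvSplit [] rest else pvSplit (cur ++ [s]) rest

-- A's fold produces acc ++ pvSplit cur l
theorem pvA_fold (l : List (List Int)) :
    ∀ (cur : List (List Int)) (acc : List (List (List Int))),
    (l.foldl
      (fun (st : List (List Int) × List (List (List Int))) (dataset_step : List Int) =>
        if pvLastVal dataset_step = 0 then
          (st.1 ++ [dataset_step], st.2)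
        else
          ([], st.2 ++ [st.1 ++ [dataset_step]]))
      (cur, acc)).2 = acc ++ pvSplit cur l := by
  induction l with
  | nil => intro cur acc; simp [pvSplit]
  | cons s rest ih =>
      intro cur acc
      by_cases h : pvLastVal s = 0
      · simp only [List.foldl_cons, if_pos h]
        rw [ih, pvSplit, if_neg (by simp [h])]
      · simp only [List.foldl_cons, if_neg h]
        rw [ih, pvSplit, if_pos h]
        simp

-- B's fold over boundaries reconstructs pvSplit cur l, where the steps list is
-- pre ++ cur ++ l, boundaries are indexed from pre.length + cur.length, and
-- prev = pre.length - 1.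
theorem pvB_fold (l : List (List Int)) :
    ∀ (pre cur : List (List Int)),
    pvEpisFold (pre ++ cur ++ l) (pvBoundsFrom ((pre.length : Int) + (cur.length : Int)) l) ((pre.length : Int) - 1)
      = pvSplit cur l := by
  induction l with
  | nil => intro pre cur; simp [pvBoundsFrom, pvEpisFold, pvSplit]
  | cons s rest ih =>
      intro pre cur
      by_cases h : pvLastVal s = 0
      · -- non-terminal: s joins the pending episode
        have e2 : (pre.length : Int) + ((cur ++ [s]).length : Int)
            = (pre.length : Int) + (cur.length : Int) + 1 := by
          simp; omega
        have hmain := ih pre (cur ++ [s])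
        rw [e2] at hmain
        simp only [List.append_assoc, List.singleton_append] at hmain ⊢
        simp only [pvBoundsFrom, pvSplit, h, ne_eq, not_true_eq_false, if_false]
        exact hmain
      · -- terminal: emit cur ++ [s], start a fresh episode
        have hslice : PySem.List.slice (pre ++ (cur ++ s :: rest))
            (some ((pre.length : Int) - 1 + 1))
            (some ((pre.length : Int) + (cur.length : Int) + 1))
            = cur ++ [s] := by
          have e1 : (pre.length : Int) - 1 + 1 = ((pre.length : Nat) : Int) := by ring
          have e2 : (pre.length : Int) + (cur.length : Int) + 1
              = ((pre.length : Nat) : Int) + ((cur.length + 1 : Nat) : Int) := by push_cast; ring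
          rw [e1, e2, PySem.List.slice_natCast_add, List.drop_left]
          simp [List.take_append]
        have hmain := ih (pre ++ cur ++ [s]) []
        have e3 : ((pre ++ cur ++ [s]).length : Int) + (([] : List (List Int)).length : Int)
            = (pre.length : Int) + (cur.length : Int) + 1 := by
          simp; omega
        have e4 : ((pre ++ cur ++ [s]).length : Int) - 1
            = (pre.length : Int) + (cur.length : Int) := by
          simp; omega
        rw [e3, e4] at hmain
        simp only [List.append_assoc, List.singleton_append, List.append_nil] at hmain ⊢
        simp only [pvBoundsFrom, pvSplit, h, ne_eq, not_false_eq_true, if_true, pvEpisFold]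
        rw [hmain]
        rw [hslice]

-- ===== VERDICT (by name: the statement is the Claim_ definition above) =====
theorem pick_eps_spec : Claim_equal_pick_eps := by
  intro dataset start end_ _ _
  show pick_eps dataset start end_ = pick_eps_alt dataset start end_
  simp only [pick_eps, pick_eps_alt]
  have hA := pvA_fold dataset [] []
  have hB := pvB_fold dataset [] []
  simp only [List.nil_append, List.length_nil, Nat.cast_zero, zero_add, add_zero, zero_sub] at hA hB
  rw [hA, hB]
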